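-- pv_equiv track=rewrite | github.com/rozensoftware/highamigaassembler | tools/c64_font_converter.py | interleave_planes
-- ===== SOURCE A (Python) =====
-- from typing import Dict, List
--
-- def interleave_planes(font_bytes: List[int], planes: int = 5) -> List[str]:
--     """Interleave glyphs into the requested number of planes; only plane 0 carries data."""
--     interleaved: List[str] = []
--     num_glyphs = len(font_bytes) // 8
--     for g in range(num_glyphs):
--         glyph = font_bytes[g * 8:(g + 1) * 8]
--         for plane in range(planes):
--             for row in range(8):
--                 src = glyph[row] & 0xFF if plane == 0 else 0
--                 interleaved.append(f"${src:02X}")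
--     return interleaved
-- ===== SOURCE B (Python) =====
-- from typing import List
--
-- def interleave_planes(font_bytes: List[int], planes: int = 5) -> List[str]:
--     """Interleave glyphs into the requested number of planes; only plane 0 carries data.
--
--     Closed-form indexing: output position k decodes to (glyph, offset) arithmetically;
--     no nested glyph/plane/row loops and no slicing.
--     """
--     block = 8 * planes
--     total = (len(font_bytes) // 8) * block
--     return [f"${font_bytes[(k // block) * 8 + k % block] & 0xFF:02X}" if k % block < 8 else "$00"
--             for k in range(total)]
-- ===== Notes on version B (the rewrite author's own statement) =====
-- stated objective: simpler
-- what changed: Replaces A's nested glyph/plane/row loops with slicing and per-string appends by a single flat list comprehension over output positions, decoding each index k arithmetically (k // block selects the glyph, k % block < 8 selects data vs zero padding).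
import Mathlib
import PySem

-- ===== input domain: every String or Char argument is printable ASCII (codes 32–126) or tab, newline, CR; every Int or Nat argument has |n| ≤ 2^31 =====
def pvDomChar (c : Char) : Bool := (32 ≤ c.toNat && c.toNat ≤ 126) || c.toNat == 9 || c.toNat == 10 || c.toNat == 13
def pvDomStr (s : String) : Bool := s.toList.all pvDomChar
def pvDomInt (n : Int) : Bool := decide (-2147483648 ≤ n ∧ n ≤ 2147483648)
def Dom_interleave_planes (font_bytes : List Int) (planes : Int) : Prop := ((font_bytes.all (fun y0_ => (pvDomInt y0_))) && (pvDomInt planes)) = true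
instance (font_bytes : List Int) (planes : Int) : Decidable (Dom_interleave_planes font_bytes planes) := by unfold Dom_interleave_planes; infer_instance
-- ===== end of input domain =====

-- B replaces A's nested glyph/plane/row loops and slicing by a single flat comprehension over
-- output positions, decoding each index arithmetically (simpler: one loop, closed-form indexing).

-- shared helper: f"${v:02X}" for 0 ≤ v ≤ 255 (exact on that range, which is all the ports use)
def hexDigit (n : Nat) : Char := if n < 10 then Char.ofNat (48 + n) else Char.ofNat (55 + n)
def hex2 (v : Int) : String := String.mk ['$', hexDigit (v.toNat / 16), hexDigit (v.toNat % 16)]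

-- ===== PORT A =====
-- glyph[row] is always in range (the slice has exactly 8 elements), so pyGetD is exact here
def interleave_planes (font_bytes : List Int) (planes : Int) : List String :=
  let num_glyphs := PySem.Int.floordiv (font_bytes.length : Int) 8
  (PySem.List.pyRange 0 num_glyphs 1).foldl (fun acc g =>
    let glyph := PySem.List.slice font_bytes (some (g * 8)) (some ((g + 1) * 8))
    (PySem.List.pyRange 0 planes 1).foldl (fun acc plane =>
      (PySem.List.pyRange 0 8 1).foldl (fun acc row =>
        let src : Int := if plane == 0 then PySem.Int.band (PySem.List.pyGetD glyph row 0) 255 else 0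
        acc ++ [hex2 src]) acc) acc) []

-- ===== PORT B =====
-- font_bytes[(k // block) * 8 + k % block] is evaluated only when total > 0 (so block > 0) and
-- k % block < 8, hence the index lies in [0, 8 * num_glyphs) ⊆ range: pyGetD is exact here
def interleave_planes_alt (font_bytes : List Int) (planes : Int) : List String :=
  let block := 8 * planes
  let total := PySem.Int.floordiv (font_bytes.length : Int) 8 * block
  (PySem.List.pyRange 0 total 1).map (fun k =>
    if PySem.Int.mod k block < 8 then
      hex2 (PySem.Int.band
        (PySem.List.pyGetD font_bytes (PySem.Int.floordiv k block * 8 + PySem.Int.mod k block) 0) 255)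
    else "$00")

-- ===== PRECONDITION & SPEC =====
def Spec_interleave_planes (font_bytes : List Int) (planes : Int) (out : List String) : Prop := out = interleave_planes_alt font_bytes planes
instance (font_bytes : List Int) (planes : Int) (out : List String) : Decidable (Spec_interleave_planes font_bytes planes out) := by unfold Spec_interleave_planes; infer_instance

-- ===== CLAIM (what is proved, stated in full; the proofs are below) =====
def Claim_equal_interleave_planes : Prop := ∀ (font_bytes : List Int) (planes : Int), Dom_interleave_planes font_bytes planes → Spec_interleave_planes font_bytes planes (interleave_planes font_bytes planes)

-- ===== LEMMAS AND PROOFS =====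

-- the per-(glyph,plane) row block of A
def rowBlock (glyph : List Int) (plane : Int) : List String :=
  (PySem.List.pyRange 0 8 1).map (fun row =>
    hex2 (if plane == 0 then PySem.Int.band (PySem.List.pyGetD glyph row 0) 255 else 0))

-- the per-glyph column function both sides reduce to
def colFun (font_bytes : List Int) (g : Int) (j : Int) : String :=
  if j < 8 then hex2 (PySem.Int.band (PySem.List.pyGetD font_bytes (g * 8 + j) 0) 255) else "$00"

lemma hex2_zero : hex2 0 = "$00" := by decide

lemma A_flatMap (font_bytes : List Int) (planes : Int) :
    interleave_planes font_bytes planes =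
      (PySem.List.pyRange 0 (PySem.Int.floordiv (font_bytes.length : Int) 8) 1).flatMap
        (fun g => (PySem.List.pyRange 0 planes 1).flatMap
          (rowBlock (PySem.List.slice font_bytes (some (g * 8)) (some ((g + 1) * 8))))) := by
  simp only [interleave_planes, PySem.List.foldl_append_singleton_eq_map,
    PySem.List.foldl_append_eq_flatMap, List.nil_append]
  rfl

-- splitting a range of length n*c into n uniform chunks of c
lemma map_pyRange_mul {α : Type} (f : Int → α) (n : Nat) (c : Int) (hc : 0 ≤ c) :
    (PySem.List.pyRange 0 ((n : Int) * c) 1).map f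
      = (PySem.List.pyRange 0 (n : Int) 1).flatMap
          (fun g => (PySem.List.pyRange 0 c 1).map (fun j => f (g * c + j))) := by
  induction n with
  | zero => simp [PySem.List.pyRange_one_eq_nil]
  | succ n ih =>
    have h1 : (0 : Int) ≤ (n : Int) * c := by positivity
    have h2 : (n : Int) * c ≤ ((n : Int) + 1) * c := by nlinarith
    rw [show ((n + 1 : Nat) : Int) * c = ((n : Int) + 1) * c by push_cast; ring,
      PySem.List.pyRange_one_append 0 ((n : Int) * c) (((n : Int) + 1) * c) h1 h2,
      List.map_append, ih,
      show ((n + 1 : Nat) : Int) = (n : Int) + 1 by push_cast; ring,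
      PySem.List.pyRange_one_succ_right (by positivity),
      List.flatMap_append, List.flatMap_singleton]
    congr 1
    rw [PySem.List.pyRange_one ((n : Int) * c) (((n : Int) + 1) * c),
      PySem.List.pyRange_one 0 c,
      show ((n : Int) + 1) * c - (n : Int) * c = c - 0 by ring,
      List.map_map, List.map_map]
    apply List.map_congr_left
    intro k _
    simp

-- the glyph slice indexes back into font_bytes
lemma pyGetD_slice (font_bytes : List Int) (g j : Int) (hg0 : 0 ≤ g)
    (hg : (g + 1) * 8 ≤ (font_bytes.length : Int)) (hj0 : 0 ≤ j) (hj : j < 8) :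
    PySem.List.pyGetD (PySem.List.slice font_bytes (some (g * 8)) (some ((g + 1) * 8))) j 0
      = PySem.List.pyGetD font_bytes (g * 8 + j) 0 := by
  set glyph := PySem.List.slice font_bytes (some (g * 8)) (some ((g + 1) * 8)) with hgl
  have hsl : glyph = (font_bytes.drop (g * 8).toNat).take 8 := by
    rw [hgl, PySem.List.slice_toNat font_bytes (by omega) (by omega)]
    congr 1
    omega
  have hlen : glyph.length = 8 := by
    rw [hsl]; simp; omega
  have hidx : (g * 8).toNat + j.toNat < font_bytes.length := by omega
  rw [PySem.List.pyGetD_eq_getElem glyph 0 hj0 (by omega),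
      PySem.List.pyGetD_eq_getElem font_bytes 0 (by omega) (by omega)]
  have h1 : glyph[j.toNat]'(by omega) = font_bytes[(g * 8).toNat + j.toNat]'hidx := by
    simp only [hsl]
    rw [List.getElem_take, List.getElem_drop]
  rw [h1]
  congr 1
  omega

-- A's plane/row double loop for one glyph is the first 8*planes columns
lemma A_glyph (font_bytes : List Int) (planes g : Int) (hp : 0 ≤ planes)
    (hg0 : 0 ≤ g) (hg : (g + 1) * 8 ≤ (font_bytes.length : Int)) :
    (PySem.List.pyRange 0 planes 1).flatMap
        (rowBlock (PySem.List.slice font_bytes (some (g * 8)) (some ((g + 1) * 8)))) =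
      (PySem.List.pyRange 0 (planes * 8) 1).map (colFun font_bytes g) := by
  rw [show planes * 8 = ((planes.toNat : Int)) * 8 by omega,
    map_pyRange_mul (colFun font_bytes g) planes.toNat 8 (by omega),
    show ((planes.toNat : Int)) = planes by omega]
  apply List.flatMap_congr
  intro p hpmem
  have hpb := (PySem.List.mem_pyRange_one).1 hpmem
  unfold rowBlock
  apply List.map_congr_left
  intro j hjmem
  have hjb := (PySem.List.mem_pyRange_one).1 hjmem
  by_cases hp0 : p = 0
  · subst hp0
    simp only [colFun]
    rw [if_pos (by omega : (0:Int) * 8 + j < 8)]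
    rw [pyGetD_slice font_bytes g j hg0 hg hjb.1 hjb.2]
    simp
  · have hb : (p == (0:Int)) = false := by simpa using hp0
    have hcol : ¬ (p * 8 + j < 8) := by omega
    simp [colFun, hb, hex2_zero, hcol]

-- unfolding B's let-bindings
lemma B_def (font_bytes : List Int) (planes : Int) :
    interleave_planes_alt font_bytes planes
      = (PySem.List.pyRange 0
            (PySem.Int.floordiv ((font_bytes.length : Nat) : Int) 8 * (8 * planes)) 1).map
          (fun k =>
            if PySem.Int.mod k (8 * planes) < 8 then
              hex2 (PySem.Int.band
                (PySem.List.pyGetD font_bytes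
                  (PySem.Int.floordiv k (8 * planes) * 8 + PySem.Int.mod k (8 * planes)) 0) 255)
            else "$00") := rfl

-- B as chunks of colFun columns
lemma B_flatMap (font_bytes : List Int) (planes : Int) (hp : 1 ≤ planes) :
    interleave_planes_alt font_bytes planes =
      (PySem.List.pyRange 0 ((font_bytes.length / 8 : Nat) : Int) 1).flatMap
        (fun g => (PySem.List.pyRange 0 (8 * planes) 1).map (colFun font_bytes g)) := by
  have hng : PySem.Int.floordiv ((font_bytes.length : Nat) : Int) 8
      = ((font_bytes.length / 8 : Nat) : Int) := by
    exact_mod_cast PySem.Int.floordiv_natCast font_bytes.length 8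
  have hb : (0 : Int) < 8 * planes := by omega
  rw [B_def, hng, map_pyRange_mul _ (font_bytes.length / 8) (8 * planes) (by omega)]
  apply List.flatMap_congr
  intro g hgmem
  have hgb := (PySem.List.mem_pyRange_one).1 hgmem
  apply List.map_congr_left
  intro j hjmem
  have hjb := (PySem.List.mem_pyRange_one).1 hjmem
  have hmod : PySem.Int.mod (g * (8 * planes) + j) (8 * planes) = j := by
    rw [PySem.Int.mod_eq_emod_of_pos hb,
      show g * (8 * planes) + j = j + (8 * planes) * g by ring,
      Int.add_mul_emod_self_left, Int.emod_eq_of_lt hjb.1 hjb.2]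
  have hdiv : PySem.Int.floordiv (g * (8 * planes) + j) (8 * planes) = g := by
    rw [PySem.Int.floordiv_eq_ediv_of_pos hb,
      show g * (8 * planes) + j = j + (8 * planes) * g by ring,
      Int.add_mul_ediv_left _ _ (by omega : (8 : Int) * planes ≠ 0),
      Int.ediv_eq_zero_of_lt hjb.1 hjb.2]
    omega
  rw [hmod, hdiv]
  unfold colFun
  rfl

-- ===== VERDICT (by name: the statement is the Claim_ definition above) =====
theorem interleave_planes_spec : Claim_equal_interleave_planes := by
  intro font_bytes planes _
  unfold Spec_interleave_planes
  have hng : PySem.Int.floordiv ((font_bytes.length : Nat) : Int) 8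
      = ((font_bytes.length / 8 : Nat) : Int) := by
    exact_mod_cast PySem.Int.floordiv_natCast font_bytes.length 8
  by_cases hp : planes < 1
  · -- no planes: A's inner loop is empty, B's range has nonpositive length
    rw [A_flatMap]
    have h1 : PySem.List.pyRange 0 planes 1 = [] :=
      PySem.List.pyRange_one_eq_nil (by omega)
    have h2 : interleave_planes_alt font_bytes planes = [] := by
      rw [B_def, hng, PySem.List.pyRange_one_eq_nil
        (by nlinarith [Int.natCast_nonneg (font_bytes.length / 8)] :
          ((font_bytes.length / 8 : Nat) : Int) * (8 * planes) ≤ 0)]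
      rfl
    simp [h1, h2]
  · rw [A_flatMap, B_flatMap font_bytes planes (by omega), hng]
    apply List.flatMap_congr
    intro g hgmem
    have hgb := (PySem.List.mem_pyRange_one).1 hgmem
    have hlen : (g + 1) * 8 ≤ (font_bytes.length : Int) := by
      have h8 : font_bytes.length / 8 * 8 ≤ font_bytes.length := Nat.div_mul_le_self _ 8
      have : g + 1 ≤ ((font_bytes.length / 8 : Nat) : Int) := by omega
      have : (g + 1) * 8 ≤ ((font_bytes.length / 8 : Nat) : Int) * 8 := by nlinarith
      omega
    rw [A_glyph font_bytes planes g (by omega) hgb.1 hlen,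
      show planes * 8 = 8 * planes by ring]
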